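-- pv_equiv track=rewrite | github.com/vsaxena33/DSA | Data Structures/Week 3/common_substring.py | has_common_substring
-- ===== SOURCE A (Python) =====
-- from collections import namedtuple
--
-- Answer = namedtuple('answer_type', 'i j len')
--
-- MOD1 = 10**9 + 7
--
-- MOD2 = 10**9 + 9
--
-- BASE1 = 911
--
-- BASE2 = 3571
--
-- def precompute_hashes(s, base, mod):
--     n = len(s)
--     prefix_hash = [0] * (n + 1)
--     power = [1] * (n + 1)
--
--     for i in range(n):
--         prefix_hash[i+1] = (prefix_hash[i] * base + ord(s[i])) % mod
--         power[i+1] = (power[i] * base) % mod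
--
--     return prefix_hash, power
--
-- def get_substring_hash(h, power, l, r, mod):
--     # Get hash of s[l:r]
--     return (h[r] - h[l] * power[r - l] % mod + mod) % mod
--
-- def get_all_hashes(s, length):
--     if length == 0:
--         return {}
--
--     h1, p1 = precompute_hashes(s, BASE1, MOD1)
--     h2, p2 = precompute_hashes(s, BASE2, MOD2)
--
--     hashes = {}
--     for i in range(len(s) - length + 1):
--         hash1 = get_substring_hash(h1, p1, i, i + length, MOD1)
--         hash2 = get_substring_hash(h2, p2, i, i + length, MOD2)
--         key = (hash1, hash2)
--         # Keep the smallest i if multiple collide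
--         if key not in hashes or i < hashes[key]:
--             hashes[key] = i
--     return hashes
--
-- def has_common_substring(s, t, length):
--     hashes_s = get_all_hashes(s, length)
--     if length == 0:
--         return Answer(0, 0, 0)
--
--     h1, p1 = precompute_hashes(t, BASE1, MOD1)
--     h2, p2 = precompute_hashes(t, BASE2, MOD2)
--
--     best_j = None
--     best_i = None
--     for j in range(len(t) - length + 1):
--         hash1 = get_substring_hash(h1, p1, j, j + length, MOD1)
--         hash2 = get_substring_hash(h2, p2, j, j + length, MOD2)
--         key = (hash1, hash2)
--         if key in hashes_s:
--             i = hashes_s[key]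
--             if best_i is None or (i < best_i) or (i == best_i and j < best_j):
--                 best_i = i
--                 best_j = j
--     if best_i is not None:
--         return Answer(best_i, best_j, length)
--     return None
-- ===== SOURCE B (Python) =====
-- from collections import namedtuple
--
-- Answer = namedtuple('answer_type', 'i j len')
--
-- MOD1 = 10**9 + 7
-- MOD2 = 10**9 + 9
-- BASE1 = 911
-- BASE2 = 3571
--
--
-- def window_key(u, k, length):
--     """Double polynomial hash of the window u[k:k+length], evaluated directly."""
--     h1 = 0
--     h2 = 0
--     for c in u[k:k + length]:
--         h1 = (h1 * BASE1 + ord(c)) % MOD1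
--         h2 = (h2 * BASE2 + ord(c)) % MOD2
--     return (h1, h2)
--
--
-- def has_common_substring(s, t, length):
--     if length == 0:
--         return Answer(0, 0, 0)
--     keys_s = [window_key(s, i, length) for i in range(len(s) - length + 1)]
--     keys_t = [window_key(t, j, length) for j in range(len(t) - length + 1)]
--     best = None
--     for i, ks in enumerate(keys_s):
--         for j, kt in enumerate(keys_t):
--             if ks == kt and (best is None or (i, j) < best):
--                 best = (i, j)
--     if best is None:
--         return None
--     return Answer(best[0], best[1], length)
-- ===== Notes on version B (the rewrite author's own statement) =====
-- stated objective: simpler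
-- what changed: Dropped A's prefix-hash/power arrays, O(1) substring-hash differencing, first-occurrence dict and running best_i/best_j scan; B hashes each window directly by a plain fold, then finds the answer as the lexicographic minimum (i, j) over a brute-force nested scan of all window-key pairs (no dict, no prefix arrays) - shorter and plainer, at the price of quadratic time.
import Mathlib
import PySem

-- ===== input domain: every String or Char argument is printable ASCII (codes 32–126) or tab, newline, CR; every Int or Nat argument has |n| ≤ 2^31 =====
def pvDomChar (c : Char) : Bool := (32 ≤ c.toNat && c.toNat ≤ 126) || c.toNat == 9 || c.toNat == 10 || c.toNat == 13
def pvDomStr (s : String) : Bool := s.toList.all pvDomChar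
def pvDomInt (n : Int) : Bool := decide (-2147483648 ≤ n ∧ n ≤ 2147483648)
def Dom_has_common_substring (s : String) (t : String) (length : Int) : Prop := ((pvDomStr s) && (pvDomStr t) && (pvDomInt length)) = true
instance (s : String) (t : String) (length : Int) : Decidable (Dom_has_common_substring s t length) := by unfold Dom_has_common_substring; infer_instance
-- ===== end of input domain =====

-- B drops A's prefix-hash/power arrays, first-occurrence dict and running best_i/best_j scan:
-- it hashes each window directly by one fold and takes the lexicographic minimum (i, j) over a
-- brute-force nested scan of all window-key pairs — shorter and plainer, not faster.

def pvMOD1 : Int := 10 ^ 9 + 7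
def pvMOD2 : Int := 10 ^ 9 + 9
def pvBASE1 : Int := 911
def pvBASE2 : Int := 3571
def pvOrd (c : Char) : Int := (c.toNat : Int)   -- ord(c), exact on ASCII

-- ===== PORT A =====
def precompute_hashes (s : List Char) (base mod : Int) : List Int × List Int :=
  -- the Python fills prefix_hash[i+1] / power[i+1] from slot i; the fold appends,
  -- reading slot i as the last element
  s.foldl
    (fun (hp : List Int × List Int) c =>
      (hp.1 ++ [PySem.Int.mod (hp.1.getLastD 0 * base + pvOrd c) mod],
       hp.2 ++ [PySem.Int.mod (hp.2.getLastD 0 * base) mod]))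
    ([0], [1])

def get_substring_hash (h power : List Int) (l r mod : Int) : Int :=
  PySem.Int.mod
    (PySem.List.pyGetD h r 0
      - PySem.Int.mod (PySem.List.pyGetD h l 0 * PySem.List.pyGetD power (r - l) 0) mod
      + mod) mod

def get_all_hashes (s : List Char) (length : Int) : PySem.Dict (Int × Int) Int :=
  if length == 0 then PySem.Dict.empty
  else
    let hp1 := precompute_hashes s pvBASE1 pvMOD1
    let hp2 := precompute_hashes s pvBASE2 pvMOD2
    (PySem.List.pyRange 0 ((s.length : Int) - length + 1) 1).foldl
      (fun d i =>
        let key := (get_substring_hash hp1.1 hp1.2 i (i + length) pvMOD1,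
                    get_substring_hash hp2.1 hp2.2 i (i + length) pvMOD2)
        if !d.contains key || decide (i < d.getD key 0) then d.insert key i else d)
      PySem.Dict.empty

def has_common_substring (s : String) (t : String) (length : Int) : Option (Int × Int × Int) :=
  let hashes_s := get_all_hashes s.toList length
  if length == 0 then some (0, 0, 0)
  else
    let hp1 := precompute_hashes t.toList pvBASE1 pvMOD1
    let hp2 := precompute_hashes t.toList pvBASE2 pvMOD2
    let best := (PySem.List.pyRange 0 ((t.toList.length : Int) - length + 1) 1).foldl
      (fun (b : Option Int × Option Int) j =>
        let key := (get_substring_hash hp1.1 hp1.2 j (j + length) pvMOD1,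
                    get_substring_hash hp2.1 hp2.2 j (j + length) pvMOD2)
        match hashes_s.get? key with
        | some i =>
          match b with
          | (none, _) => (some i, some j)
          | (some bi, bj) =>
            if i < bi then (some i, some j)
            else if i = bi then
              match bj with
              | some bjv => if j < bjv then (some i, some j) else (some bi, some bjv)
              | none => (some bi, none)   -- unreachable: best_j is set whenever best_i is
            else (some bi, bj)
        | none => b)
      (none, none)
    match best with
    | (some i, some j) => some (i, j, length)
    | _ => none

-- ===== PORT B =====
def window_key (u : List Char) (k length : Int) : Int × Int :=
  -- double polynomial hash of u[k:k+length], evaluated directly by one fold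
  (PySem.List.slice u (some k) (some (k + length))).foldl
    (fun (h : Int × Int) c =>
      (PySem.Int.mod (h.1 * pvBASE1 + pvOrd c) pvMOD1,
       PySem.Int.mod (h.2 * pvBASE2 + pvOrd c) pvMOD2))
    (0, 0)

def has_common_substring_alt (s : String) (t : String) (length : Int) : Option (Int × Int × Int) :=
  if length == 0 then some (0, 0, 0)
  else
    let keysS := (PySem.List.pyRange 0 ((s.toList.length : Int) - length + 1) 1).map
        (fun i => window_key s.toList i length)
    let keysT := (PySem.List.pyRange 0 ((t.toList.length : Int) - length + 1) 1).map
        (fun j => window_key t.toList j length)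
    let best := (PySem.List.enumerate keysS 0).foldl
        (fun (b : Option (Int × Int)) p =>
          (PySem.List.enumerate keysT 0).foldl
            (fun (b : Option (Int × Int)) q =>
              if p.2 = q.2 then
                match b with
                | none => some (p.1, q.1)
                | some bv =>
                  if p.1 < bv.1 ∨ (p.1 = bv.1 ∧ q.1 < bv.2) then some (p.1, q.1) else b
              else b)
            b)
        none
    match best with
    | some bv => some (bv.1, bv.2, length)
    | none => none

-- ===== PRECONDITION & SPEC =====
-- Pre_ is the function's natural domain 0 ≤ length: on every negative length the Python A
-- raises IndexError (the window start index runs past the end of the prefix-hash array).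
def Pre_has_common_substring (s : String) (t : String) (length : Int) : Prop := 0 ≤ length
instance (s : String) (t : String) (length : Int) : Decidable (Pre_has_common_substring s t length) := by unfold Pre_has_common_substring; infer_instance

def pvWitness_has_common_substring : String × String × Int := ("ab", "zab", 2)

def Spec_has_common_substring (s : String) (t : String) (length : Int) (out : Option (Int × Int × Int)) : Prop := out = has_common_substring_alt s t length
instance (s : String) (t : String) (length : Int) (out : Option (Int × Int × Int)) : Decidable (Spec_has_common_substring s t length out) := by unfold Spec_has_common_substring; infer_instance

-- ===== CLAIM (what is proved, stated in full; the proofs are below) =====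
def Claim_equal_has_common_substring : Prop := ∀ (s : String) (t : String) (length : Int), Dom_has_common_substring s t length → Pre_has_common_substring s t length → Spec_has_common_substring s t length (has_common_substring s t length)

-- ===== LEMMAS AND PROOFS =====

-- proof-only machinery: the canonical window hash both ports compute

def pvStepP (b : Int) (h : Int) (c : Char) : Int := h * b + pvOrd c
def pvP (b : Int) (cs : List Char) : Int := cs.foldl (pvStepP b) 0
def pvWH (b m : Int) (L : Nat) (cs : List Char) (k : Nat) : Int :=
  PySem.Int.mod (pvP b ((cs.drop k).take L)) m
def pvKey (L : Nat) (cs : List Char) (k : Nat) : Int × Int :=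
  (pvWH pvBASE1 pvMOD1 L cs k, pvWH pvBASE2 pvMOD2 L cs k)
def pvPs (L : Nat) (cs : List Char) : List (Int × (Int × Int)) :=
  (List.range (cs.length + 1 - L)).map (fun (k : Nat) => ((k : Int), pvKey L cs k))
def pvPH (b m : Int) (cs : List Char) : List Int × List Int :=
  ((List.range (cs.length + 1)).map (fun i => PySem.Int.mod (pvP b (cs.take i)) m),
   (List.range (cs.length + 1)).map (fun i => PySem.Int.mod (b ^ i) m))
def pvConv : Option (Int × Int) → Option Int × Option Int
  | none => (none, none)
  | some x => (some x.1, some x.2)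

-- strict lexicographic order on (i, j) candidates, and the keep-the-minimum step
def pvLt (c d : Int × Int) : Prop := c.1 < d.1 ∨ (c.1 = d.1 ∧ c.2 < d.2)
def pvUpd (b : Option (Int × Int)) (c : Int × Int) : Option (Int × Int) :=
  match b with
  | none => some c
  | some bv => if c.1 < bv.1 ∨ (c.1 = bv.1 ∧ c.2 < bv.2) then some c else some bv

-- candidate lists: A's (first s-index per t-window key) and B's (all matching index pairs)
def pvCA (NS NT : Nat) (F G : Nat → Int × Int) : List (Int × Int) :=
  (List.range NT).filterMap
    (fun j => ((List.range NS).find? (fun i => F i == G j)).map (fun (i : Nat) => ((i : Int), (j : Int))))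
def pvCB (NS NT : Nat) (F G : Nat → Int × Int) : List (Int × Int) :=
  (List.range NS).flatMap
    (fun i => (List.range NT).filterMap
      (fun j => if F i = G j then some ((i : Int), (j : Int)) else none))

lemma pvP_shift (b : Int) (ys : List Char) : ∀ a : Int,
    ys.foldl (pvStepP b) a = a * b ^ ys.length + pvP b ys := by
  induction ys with
  | nil => intro a; simp [pvP]
  | cons c ys ih =>
    intro a
    have e1 : List.foldl (pvStepP b) a (c :: ys) = List.foldl (pvStepP b) (pvStepP b a c) ys := rfl
    have e2 : pvP b (c :: ys) = List.foldl (pvStepP b) (pvStepP b 0 c) ys := rfl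
    rw [e1, ih (pvStepP b a c), e2, ih (pvStepP b 0 c), List.length_cons]
    simp only [pvStepP]
    ring

lemma pvP_append (b : Int) (xs ys : List Char) :
    pvP b (xs ++ ys) = pvP b xs * b ^ ys.length + pvP b ys := by
  simp only [pvP, List.foldl_append]
  rw [pvP_shift]; rfl

lemma pvP_singleton (b : Int) (c : Char) : pvP b [c] = pvOrd c := by
  simp [pvP, pvStepP]

lemma pvModEq {m : Int} (hm : 0 < m) (x : Int) :
    Int.ModEq m (PySem.Int.mod x m) x := by
  rw [PySem.Int.mod_eq_emod_of_pos hm]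
  exact Int.emod_emod_of_dvd x dvd_rfl

lemma pvMod_eq_of_modeq {m x y : Int} (hm : 0 < m) (h : Int.ModEq m x y) :
    PySem.Int.mod x m = PySem.Int.mod y m := by
  rw [PySem.Int.mod_eq_emod_of_pos hm, PySem.Int.mod_eq_emod_of_pos hm]
  exact h

lemma pvFold_mod (b : Int) {m : Int} (hm : 0 < m) :
    ∀ (xs : List Char) (a : Int),
    xs.foldl (fun h c => PySem.Int.mod (h * b + pvOrd c) m) (PySem.Int.mod a m)
      = PySem.Int.mod (xs.foldl (pvStepP b) a) m := by
  intro xs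
  induction xs with
  | nil => intro a; simp
  | cons c xs ih =>
    intro a
    simp only [List.foldl_cons]
    have h1 : PySem.Int.mod (PySem.Int.mod a m * b + pvOrd c) m
        = PySem.Int.mod (a * b + pvOrd c) m :=
      pvMod_eq_of_modeq hm (((pvModEq hm a).mul_right b).add_right (pvOrd c))
    rw [h1, ih (a * b + pvOrd c)]
    rfl

-- ===== the prefix/power arrays of A compute the canonical hashes =====

lemma pvPrecompute_eq (b : Int) {m : Int} (hm : 1 < m) (cs : List Char) :
    precompute_hashes cs b m = pvPH b m cs := by
  have hm0 : 0 < m := by omega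
  have hstep : ∀ (pref : List Char) (c : Char),
      ((pvPH b m pref).1 ++ [PySem.Int.mod ((pvPH b m pref).1.getLastD 0 * b + pvOrd c) m],
       (pvPH b m pref).2 ++ [PySem.Int.mod ((pvPH b m pref).2.getLastD 0 * b) m])
      = pvPH b m (pref ++ [c]) := by
    intro pref c
    have hlast1 : (pvPH b m pref).1.getLastD 0 = PySem.Int.mod (pvP b pref) m := by
      simp only [pvPH, List.range_succ, List.map_append, List.map_cons, List.map_nil,
        List.getLastD_concat, List.take_length]
    have hlast2 : (pvPH b m pref).2.getLastD 0 = PySem.Int.mod (b ^ pref.length) m := by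
      simp only [pvPH, List.range_succ, List.map_append, List.map_cons, List.map_nil,
        List.getLastD_concat]
    have hnew1 : PySem.Int.mod (PySem.Int.mod (pvP b pref) m * b + pvOrd c) m
        = PySem.Int.mod (pvP b (pref ++ [c])) m := by
      have : pvP b (pref ++ [c]) = pvP b pref * b + pvOrd c := by
        rw [pvP_append, pvP_singleton]
        simp only [List.length_cons, List.length_nil, zero_add, pow_one]
      rw [this]
      exact pvMod_eq_of_modeq hm0 (((pvModEq hm0 _).mul_right b).add_right _)
    have hnew2 : PySem.Int.mod (PySem.Int.mod (b ^ pref.length) m * b) m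
        = PySem.Int.mod (b ^ (pref.length + 1)) m := by
      have h := (pvModEq hm0 (b ^ pref.length)).mul_right b
      rw [← pow_succ] at h
      exact pvMod_eq_of_modeq hm0 h
    have hsn1 : (pvPH b m (pref ++ [c])).1
        = (pvPH b m pref).1 ++ [PySem.Int.mod (pvP b (pref ++ [c])) m] := by
      unfold pvPH
      simp only [List.length_append, List.length_cons, List.length_nil, zero_add]
      rw [List.range_succ, List.map_append]
      congr 1
      · refine List.map_congr_left ?_
        intro i hi
        rw [List.take_append_of_le_length (by have := List.mem_range.mp hi; omega)]
      · rw [List.map_cons, List.map_nil,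
          List.take_of_length_le (by simp)]
    have hsn2 : (pvPH b m (pref ++ [c])).2
        = (pvPH b m pref).2 ++ [PySem.Int.mod (b ^ (pref.length + 1)) m] := by
      unfold pvPH
      simp only [List.length_append, List.length_cons, List.length_nil, zero_add]
      rw [List.range_succ, List.map_append, List.map_cons, List.map_nil]
    refine Prod.ext ?_ ?_
    · show (pvPH b m pref).1
        ++ [PySem.Int.mod ((pvPH b m pref).1.getLastD 0 * b + pvOrd c) m]
        = (pvPH b m (pref ++ [c])).1
      rw [hlast1, hnew1, hsn1]
    · show (pvPH b m pref).2 ++ [PySem.Int.mod ((pvPH b m pref).2.getLastD 0 * b) m]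
        = (pvPH b m (pref ++ [c])).2
      rw [hlast2, hnew2, hsn2]
  have hfold : ∀ (rest pref : List Char),
      rest.foldl
        (fun (hp : List Int × List Int) c =>
          (hp.1 ++ [PySem.Int.mod (hp.1.getLastD 0 * b + pvOrd c) m],
           hp.2 ++ [PySem.Int.mod (hp.2.getLastD 0 * b) m])) (pvPH b m pref)
      = pvPH b m (pref ++ rest) := by
    intro rest
    induction rest with
    | nil => intro pref; simp
    | cons c rest ih =>
      intro pref
      simp only [List.foldl_cons]
      rw [hstep pref c, ih (pref ++ [c])]
      simp
  have hinit : (([0], [1]) : List Int × List Int) = pvPH b m [] := by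
    have e0 : PySem.Int.mod 0 m = 0 := by
      rw [PySem.Int.mod_eq_emod_of_pos hm0]; simp
    have e1 : PySem.Int.mod 1 m = 1 := by
      rw [PySem.Int.mod_eq_emod_of_pos hm0]
      exact Int.emod_eq_of_lt (by omega) (by omega)
    unfold pvPH
    simp [pvP, e0, e1]
  unfold precompute_hashes
  rw [hinit, hfold cs []]
  simp

-- ===== A's substring hash of window k is the canonical window hash =====

lemma pvGsh_eq (b : Int) {m : Int} (hm : 0 < m) (cs : List Char) (L k : Nat)
    (hk : k + L ≤ cs.length) :
    get_substring_hash (pvPH b m cs).1 (pvPH b m cs).2 (k : Int) ((k : Int) + (L : Int)) m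
      = pvWH b m L cs k := by
  have h1 : (k : Int) + (L : Int) = ((k + L : Nat) : Int) := by push_cast; ring
  unfold get_substring_hash
  rw [h1, show ((k + L : Nat) : Int) - (k : Int) = ((L : Nat) : Int) by push_cast; ring]
  simp only [pvPH, PySem.List.pyGetD_natCast]
  rw [PySem.List.getD_map_range _ _ _ _ (by omega),
      PySem.List.getD_map_range _ _ _ _ (by omega),
      PySem.List.getD_map_range _ _ _ _ (by omega)]
  have hsplit : cs.take (k + L) = cs.take k ++ (cs.drop k).take L := List.take_add
  have hlen : ((cs.drop k).take L).length = L := by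
    simp only [List.length_take, List.length_drop]; omega
  have hA : pvP b (cs.take (k + L))
      = pvP b (cs.take k) * b ^ L + pvP b ((cs.drop k).take L) := by
    rw [hsplit, pvP_append, hlen]
  have hm0 : Int.ModEq m m 0 := Int.modEq_zero_iff_dvd.mpr dvd_rfl
  have hin : Int.ModEq m
      (PySem.Int.mod (PySem.Int.mod (pvP b (cs.take k)) m * PySem.Int.mod (b ^ L) m) m)
      (pvP b (cs.take k) * b ^ L) :=
    (pvModEq hm _).trans ((pvModEq hm _).mul (pvModEq hm _))
  have hfull := (((pvModEq hm (pvP b (cs.take (k + L)))).sub hin).add hm0)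
  unfold pvWH
  refine pvMod_eq_of_modeq hm ?_
  calc PySem.Int.mod (pvP b (cs.take (k + L))) m
        - PySem.Int.mod (PySem.Int.mod (pvP b (cs.take k)) m * PySem.Int.mod (b ^ L) m) m + m
      ≡ pvP b (cs.take (k + L)) - pvP b (cs.take k) * b ^ L + 0 [ZMOD m] := hfull
    _ = pvP b ((cs.drop k).take L) := by rw [hA]; ring

-- ===== the two dict-building loops agree when indices are increasing =====

lemma pvDict_eq :
    ∀ (ps : List (Int × (Int × Int))) (d : PySem.Dict (Int × Int) Int),
    ps.Pairwise (fun p q => p.1 < q.1) →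
    (∀ k v, d.get? k = some v → ∀ p ∈ ps, v < p.1) →
    ps.foldl (fun d p =>
        if !d.contains p.2 || decide (p.1 < d.getD p.2 0) then d.insert p.2 p.1 else d) d
      = ps.foldl (fun d p => if d.contains p.2 then d else d.insert p.2 p.1) d := by
  intro ps
  induction ps with
  | nil => intro d _ _; rfl
  | cons p ps ih =>
    intro d hpw hv
    simp only [List.foldl_cons]
    rcases List.pairwise_cons.mp hpw with ⟨hhead, htail⟩
    by_cases hc : d.contains p.2
    · obtain ⟨v, hvv⟩ : ∃ v, d.get? p.2 = some v := by
        rw [PySem.Dict.contains_eq_isSome_get?] at hc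
        exact Option.isSome_iff_exists.mp hc
      have hvd : d.getD p.2 0 = v := PySem.Dict.getD_of_get?_eq_some d 0 hvv
      have hvlt : v < p.1 := hv p.2 v hvv p (by simp)
      rw [if_pos hc, if_neg (by simp [hc, hvd]; omega)]
      exact ih d htail (fun k w hw q hq => hv k w hw q (by simp [hq]))
    · rw [if_neg hc, if_pos (by simp [hc])]
      refine ih (d.insert p.2 p.1) htail ?_
      intro k w hw q hq
      rw [PySem.Dict.get?_insert] at hw
      by_cases hk : k = p.2
      · rw [if_pos hk] at hw
        cases hw
        exact hhead q hq
      · rw [if_neg hk] at hw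
        exact hv k w hw q (by simp [hq])

-- ===== a first-wins dict IS the find?-first map of its pair list =====

lemma pvFW_get? {κ ν : Type} [BEq κ] [LawfulBEq κ] [DecidableEq κ] :
    ∀ (ps : List (ν × κ)) (d : PySem.Dict κ ν) (k : κ),
    (ps.foldl (fun d p => if d.contains p.2 then d else d.insert p.2 p.1) d).get? k
      = (d.get? k).or ((ps.find? (fun p => p.2 == k)).map (·.1)) := by
  intro ps
  induction ps with
  | nil => intro d k; simp
  | cons p ps ih =>
    intro d k
    simp only [List.foldl_cons, List.find?_cons]
    by_cases hc : d.contains p.2 = true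
    · rw [if_pos hc]
      cases hpk : (p.2 == k) with
      | true =>
        have hk : p.2 = k := eq_of_beq hpk
        subst hk
        obtain ⟨v, hv⟩ : ∃ v, d.get? p.2 = some v := by
          rw [PySem.Dict.contains_eq_isSome_get?] at hc
          exact Option.isSome_iff_exists.mp hc
        rw [ih d p.2, hv]
        simp
      | false => rw [ih d k]
    · rw [if_neg hc, ih (d.insert p.2 p.1) k]
      cases hpk : (p.2 == k) with
      | true =>
        have hk : p.2 = k := eq_of_beq hpk
        subst hk
        have hd : d.get? p.2 = none := by
          rw [PySem.Dict.contains_eq_isSome_get?] at hc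
          exact Option.not_isSome_iff_eq_none.mp (by simp [hc])
        rw [PySem.Dict.get?_insert, if_pos rfl, hd]
        simp
      | false =>
        have hk : k ≠ p.2 := fun h => by subst h; simp at hpk
        rw [PySem.Dict.get?_insert, if_neg hk]

-- ===== enumerate over a mapped range is the indexed key list =====

lemma pvEnum_map {α β : Type} (g : α → β) :
    ∀ (xs : List α) (s : Int),
    PySem.List.enumerate (xs.map g) s
      = (PySem.List.enumerate xs s).map (fun p => (p.1, g p.2)) := by
  intro xs
  induction xs with
  | nil => intro s; simp [PySem.List.enumerate_nil]
  | cons x xs ih =>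
    intro s
    simp [PySem.List.enumerate_cons, ih (s + 1)]

lemma pvEnum_range : ∀ (W : Nat),
    PySem.List.enumerate (List.range W) 0
      = (List.range W).map (fun (k : Nat) => ((k : Int), k)) := by
  intro W
  induction W with
  | zero => simp [PySem.List.enumerate_nil]
  | succ W ih =>
    rw [List.range_succ, PySem.List.enumerate_append, ih, List.map_append]
    simp [PySem.List.enumerate_cons, PySem.List.enumerate_nil]

lemma pvEnum_keys (L : Nat) (cs : List Char) :
    PySem.List.enumerate ((List.range (cs.length + 1 - L)).map (pvKey L cs)) 0
      = pvPs L cs := by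
  rw [pvEnum_map, pvEnum_range, List.map_map]
  rfl

-- ===== A's pair-of-Options scan simulates the Option-pair minimum scan =====

lemma pvScan_eq (d : PySem.Dict (Int × Int) Int) :
    ∀ (ps : List (Int × (Int × Int))) (bb : Option (Int × Int)),
    ps.foldl (fun (b : Option Int × Option Int) p =>
        match d.get? p.2 with
        | some i =>
          match b with
          | (none, _) => (some i, some p.1)
          | (some bi, bj) =>
            if i < bi then (some i, some p.1)
            else if i = bi then
              match bj with
              | some bjv => if p.1 < bjv then (some i, some p.1) else (some bi, some bjv)
              | none => (some bi, none)
            else (some bi, bj)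
        | none => b) (pvConv bb)
      = pvConv (ps.foldl (fun (b : Option (Int × Int)) p =>
          match d.get? p.2 with
          | some i => pvUpd b (i, p.1)
          | none => b) bb) := by
  intro ps
  induction ps with
  | nil => intro bb; rfl
  | cons p ps ih =>
    intro bb
    simp only [List.foldl_cons]
    have hstep : (match d.get? p.2 with
        | some i =>
          match pvConv bb with
          | (none, _) => (some i, some p.1)
          | (some bi, bj) =>
            if i < bi then (some i, some p.1)
            else if i = bi then
              match bj with
              | some bjv => if p.1 < bjv then (some i, some p.1) else (some bi, some bjv)
              | none => (some bi, none)
            else (some bi, bj)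
        | none => pvConv bb)
        = pvConv (match d.get? p.2 with
          | some i => pvUpd bb (i, p.1)
          | none => bb) := by
      cases hd : d.get? p.2 with
      | none => rfl
      | some i =>
        cases bb with
        | none => rfl
        | some bv =>
          obtain ⟨bi, bj⟩ := bv
          simp only [pvConv, pvUpd]
          by_cases h1 : i < bi
          · rw [if_pos h1, if_pos (Or.inl h1)]
          · rw [if_neg h1]
            by_cases h2 : i = bi
            · subst h2
              rw [if_pos rfl]
              by_cases h3 : p.1 < bj
              · rw [if_pos h3, if_pos (Or.inr ⟨rfl, h3⟩)]
              · rw [if_neg h3, if_neg (by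
                  rintro (h | ⟨-, hj⟩)
                  exacts [h1 h, h3 hj])]
            · rw [if_neg h2, if_neg (by
                rintro (h | ⟨he, -⟩)
                exacts [h1 h, h2 he])]
    rw [hstep, ih]

-- ===== generic fold shapes: optional candidates and nested scans into plain min-folds =====

lemma pvFoldOpt {α : Type} (h : α → Option (Int × Int)) :
    ∀ (xs : List α) (b : Option (Int × Int)),
    xs.foldl (fun b x => match h x with | some c => pvUpd b c | none => b) b
      = (xs.filterMap h).foldl pvUpd b := by
  intro xs
  induction xs with
  | nil => intro b; rfl
  | cons x xs ih =>
    intro b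
    cases hx : h x <;> simp [hx, ih]

lemma pvFmFlat {α : Type} (g : α → List (Int × Int)) :
    ∀ (xs : List α) (b : Option (Int × Int)),
    xs.foldl (fun b x => (g x).foldl pvUpd b) b = (xs.flatMap g).foldl pvUpd b := by
  intro xs
  induction xs with
  | nil => intro b; rfl
  | cons x xs ih =>
    intro b
    simp only [List.foldl_cons, List.flatMap_cons, List.foldl_append, ih]

-- ===== minimum-fold characterisation =====

lemma pvLt_trans {a b c : Int × Int} (h1 : pvLt a b) (h2 : pvLt b c) : pvLt a c := by
  obtain ⟨a1, a2⟩ := a; obtain ⟨b1, b2⟩ := b; obtain ⟨c1, c2⟩ := c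
  simp only [pvLt] at *; omega

lemma pvLt_total {a b : Int × Int} (h : ¬ pvLt a b) : a = b ∨ pvLt b a := by
  obtain ⟨a1, a2⟩ := a; obtain ⟨b1, b2⟩ := b
  simp only [pvLt, Prod.mk.injEq] at *; omega

lemma pvLe_antisymm {a b : Int × Int} (h1 : a = b ∨ pvLt a b) (h2 : b = a ∨ pvLt b a) :
    a = b := by
  obtain ⟨a1, a2⟩ := a; obtain ⟨b1, b2⟩ := b
  simp only [pvLt, Prod.mk.injEq] at *; omega

lemma pvFm_some : ∀ (C : List (Int × Int)) (x : Int × Int),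
    ∃ r, C.foldl pvUpd (some x) = some r ∧ (r = x ∨ r ∈ C) ∧ (r = x ∨ pvLt r x)
      ∧ ∀ c ∈ C, r = c ∨ pvLt r c := by
  intro C
  induction C with
  | nil => intro x; exact ⟨x, rfl, Or.inl rfl, Or.inl rfl, by simp⟩
  | cons c C ih =>
    intro x
    by_cases hlt : c.1 < x.1 ∨ (c.1 = x.1 ∧ c.2 < x.2)
    · have hupd : pvUpd (some x) c = some c := by
        simp only [pvUpd]; rw [if_pos hlt]
      have hlt' : pvLt c x := hlt
      rw [List.foldl_cons, hupd]
      obtain ⟨r, hr, hmem, hle, hall⟩ := ih c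
      refine ⟨r, hr, ?_, ?_, ?_⟩
      · rcases hmem with h | h
        · exact Or.inr (by simp [h])
        · exact Or.inr (by simp [h])
      · rcases hle with h | h
        · exact Or.inr (h ▸ hlt')
        · exact Or.inr (pvLt_trans h hlt')
      · intro c' hc'
        rcases List.mem_cons.mp hc' with h | h
        · subst h; exact hle
        · exact hall c' h
    · have hupd : pvUpd (some x) c = some x := by
        simp only [pvUpd]; rw [if_neg hlt]
      have hlt' : ¬ pvLt c x := hlt
      rw [List.foldl_cons, hupd]
      obtain ⟨r, hr, hmem, hle, hall⟩ := ih x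
      refine ⟨r, hr, ?_, hle, ?_⟩
      · rcases hmem with h | h
        · exact Or.inl h
        · exact Or.inr (by simp [h])
      · intro c' hc'
        rcases List.mem_cons.mp hc' with h | h
        · subst h
          rcases pvLt_total hlt' with he | hxc
          · rcases hle with h' | h'
            · exact Or.inl (h'.trans he.symm ▸ by rw [h', ← he])
            · exact Or.inr (he ▸ h')
          · rcases hle with h' | h'
            · exact Or.inr (h' ▸ hxc)
            · exact Or.inr (pvLt_trans h' hxc)
        · exact hall c' h

lemma pvFm_min : ∀ (C : List (Int × Int)), C ≠ [] →
    ∃ r, C.foldl pvUpd none = some r ∧ r ∈ C ∧ ∀ c ∈ C, r = c ∨ pvLt r c := by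
  intro C hC
  cases C with
  | nil => exact absurd rfl hC
  | cons c C =>
    have h0 : pvUpd none c = some c := rfl
    obtain ⟨r, hr, hmem, hle, hall⟩ := pvFm_some C c
    refine ⟨r, by rw [List.foldl_cons, h0, hr], ?_, ?_⟩
    · rcases hmem with h | h
      · simp [h]
      · simp [h]
    · intro c' hc'
      rcases List.mem_cons.mp hc' with h | h
      · subst h; exact hle
      · exact hall c' h

-- ===== the first satisfying index of find? over a range is minimal =====

lemma pvFindRange {p : Nat → Bool} : ∀ (n m : Nat),
    (List.range n).find? p = some m → p m = true ∧ m < n ∧ ∀ k, k < m → p k = false := by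
  intro n
  induction n with
  | zero => intro m h; simp at h
  | succ n ih =>
    intro m h
    rw [List.range_succ, List.find?_append] at h
    cases h1 : (List.range n).find? p with
    | some m' =>
      rw [h1] at h
      rw [Option.some_or] at h
      obtain rfl := Option.some.inj h
      obtain ⟨hp, hlt, hmin⟩ := ih _ h1
      exact ⟨hp, by omega, hmin⟩
    | none =>
      rw [h1] at h
      simp only [Option.none_or] at h
      cases hp : p n with
      | false => simp [List.find?, hp] at h
      | true =>
        have : m = n := by simp [List.find?, hp] at h; omega
        subst this
        refine ⟨hp, by omega, ?_⟩
        intro k hk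
        have := List.find?_eq_none.mp h1 k (List.mem_range.mpr hk)
        simpa using this

-- ===== memberships of the two candidate lists and the min-transfer =====

lemma pvMem_CB {NS NT : Nat} {F G : Nat → Int × Int} {r : Int × Int} :
    r ∈ pvCB NS NT F G ↔
      ∃ i j, i < NS ∧ j < NT ∧ F i = G j ∧ r = ((i : Int), (j : Int)) := by
  simp only [pvCB, List.mem_flatMap, List.mem_filterMap, List.mem_range]
  constructor
  · rintro ⟨i, hi, j, hj, hr⟩
    by_cases hFG : F i = G j
    · rw [if_pos hFG] at hr
      exact ⟨i, j, hi, hj, hFG, (Option.some.inj hr).symm⟩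
    · rw [if_neg hFG] at hr; cases hr
  · rintro ⟨i, j, hi, hj, hFG, hr⟩
    exact ⟨i, hi, j, hj, by rw [if_pos hFG, hr]⟩

lemma pvMem_CA {NS NT : Nat} {F G : Nat → Int × Int} {r : Int × Int} :
    r ∈ pvCA NS NT F G ↔
      ∃ j, j < NT ∧ ∃ i, (List.range NS).find? (fun i => F i == G j) = some i
        ∧ r = ((i : Int), (j : Int)) := by
  simp only [pvCA, List.mem_filterMap, List.mem_range]
  constructor
  · rintro ⟨j, hj, hr⟩
    cases hf : (List.range NS).find? (fun i => F i == G j) with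
    | none => rw [hf] at hr; cases hr
    | some i =>
      rw [hf] at hr
      exact ⟨j, hj, i, hf, (Option.some.inj hr).symm⟩
  · rintro ⟨j, hj, i, hf, hr⟩
    exact ⟨j, hj, by rw [hf, hr]; rfl⟩

lemma pvCA_sub {NS NT : Nat} {F G : Nat → Int × Int} {r : Int × Int}
    (h : r ∈ pvCA NS NT F G) : r ∈ pvCB NS NT F G := by
  obtain ⟨j, hj, i, hf, hr⟩ := pvMem_CA.mp h
  obtain ⟨hp, hi, -⟩ := pvFindRange NS i hf
  exact pvMem_CB.mpr ⟨i, j, hi, hj, eq_of_beq hp, hr⟩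

lemma pvCB_min_CA {NS NT : Nat} {F G : Nat → Int × Int} {r : Int × Int}
    (hmem : r ∈ pvCB NS NT F G) (hmin : ∀ c ∈ pvCB NS NT F G, r = c ∨ pvLt r c) :
    r ∈ pvCA NS NT F G := by
  obtain ⟨i, j, hi, hj, hFG, hr⟩ := pvMem_CB.mp hmem
  have hsome : ((List.range NS).find? (fun i => F i == G j)).isSome := by
    rw [List.find?_isSome]
    exact ⟨i, List.mem_range.mpr hi, beq_iff_eq.mpr hFG⟩
  obtain ⟨i0, hf⟩ := Option.isSome_iff_exists.mp hsome
  obtain ⟨hp0, hi0, hmin0⟩ := pvFindRange NS i0 hf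
  have hle : i0 ≤ i := by
    by_contra hgt
    have := hmin0 i (by omega)
    rw [beq_iff_eq.mpr hFG] at this
    cases this
  have hc0 : ((i0 : Int), (j : Int)) ∈ pvCB NS NT F G :=
    pvMem_CB.mpr ⟨i0, j, hi0, hj, eq_of_beq hp0, rfl⟩
  have := hmin _ hc0
  have hri : r = ((i0 : Int), (j : Int)) := by
    rcases this with h | h
    · exact h
    · subst hr
      simp only [pvLt] at h
      rcases h with h | ⟨-, h⟩ <;> omega
  exact pvMem_CA.mpr ⟨j, hj, i0, hf, hri⟩

lemma pvFm_CA_CB (NS NT : Nat) (F G : Nat → Int × Int) :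
    (pvCA NS NT F G).foldl pvUpd none = (pvCB NS NT F G).foldl pvUpd none := by
  by_cases hB : pvCB NS NT F G = []
  · have hA : pvCA NS NT F G = [] := by
      rw [List.eq_nil_iff_forall_not_mem]
      intro r hr
      have := pvCA_sub hr
      rw [hB] at this
      cases this
    rw [hA, hB]
  · have hA : pvCA NS NT F G ≠ [] := by
      obtain ⟨r, hr⟩ := List.exists_mem_of_ne_nil _ hB
      obtain ⟨i, j, hi, hj, hFG, -⟩ := pvMem_CB.mp hr
      intro hnil
      have hsome : ((List.range NS).find? (fun i => F i == G j)).isSome := by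
        rw [List.find?_isSome]
        exact ⟨i, List.mem_range.mpr hi, beq_iff_eq.mpr hFG⟩
      obtain ⟨i0, hf⟩ := Option.isSome_iff_exists.mp hsome
      have : ((i0 : Int), (j : Int)) ∈ pvCA NS NT F G :=
        pvMem_CA.mpr ⟨j, hj, i0, hf, rfl⟩
      rw [hnil] at this
      cases this
    obtain ⟨ra, hra, hamem, hamin⟩ := pvFm_min _ hA
    obtain ⟨rb, hrb, hbmem, hbmin⟩ := pvFm_min _ hB
    have hab : ra = rb := by
      have h1 := hamin rb (pvCB_min_CA hbmem hbmin)
      have h2 := hbmin ra (pvCA_sub hamem)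
      exact pvLe_antisymm h1 h2
    rw [hra, hrb, hab]

-- ===== reference form both ports reduce to =====

def pvRef (s t : String) (L : Nat) : Option (Int × Int × Int) :=
  let d := (pvPs L s.toList).foldl
      (fun (d : PySem.Dict (Int × Int) Int) p =>
        if d.contains p.2 then d else d.insert p.2 p.1) PySem.Dict.empty
  let best := (pvPs L t.toList).foldl
      (fun (b : Option (Int × Int)) p =>
        match d.get? p.2 with
        | some i => pvUpd b (i, p.1)
        | none => b) none
  match best with
  | some bv => some (bv.1, bv.2, (L : Int))
  | none => none

lemma pvMOD1_pos : (1 : Int) < pvMOD1 := by norm_num [pvMOD1]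
lemma pvMOD2_pos : (1 : Int) < pvMOD2 := by norm_num [pvMOD2]

lemma pvM1 : (0 : Int) < pvMOD1 := by norm_num [pvMOD1]
lemma pvM2 : (0 : Int) < pvMOD2 := by norm_num [pvMOD2]

lemma pvLne (L : Nat) (hL : 1 ≤ L) : (((L : Nat) : Int) == 0) = false := by
  simp; omega

lemma pvDictA (cs : List Char) (L : Nat) (hL : 1 ≤ L) :
    get_all_hashes cs (L : Int)
      = (pvPs L cs).foldl
          (fun d p =>
            if !d.contains p.2 || decide (p.1 < d.getD p.2 0) then d.insert p.2 p.1 else d)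
          PySem.Dict.empty := by
  simp only [get_all_hashes, pvLne L hL, Bool.false_eq_true, if_false]
  rw [pvPrecompute_eq pvBASE1 pvMOD1_pos cs, pvPrecompute_eq pvBASE2 pvMOD2_pos cs]
  rw [PySem.List.pyRange_one, sub_zero,
    show (((cs.length : Int)) - (L : Int) + 1).toNat = cs.length + 1 - L from by omega]
  rw [List.foldl_map]
  unfold pvPs
  rw [List.foldl_map]
  apply PySem.List.foldl_congr_mem
  intro d k hk
  have hkL : k + L ≤ cs.length := by have := List.mem_range.mp hk; omega
  simp only [zero_add]
  rw [pvGsh_eq pvBASE1 pvM1 cs L k hkL, pvGsh_eq pvBASE2 pvM2 cs L k hkL]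
  rfl

lemma pvScanA (cs : List Char) (L : Nat) (hs : PySem.Dict (Int × Int) Int) :
    (PySem.List.pyRange 0 ((cs.length : Int) - (L : Int) + 1) 1).foldl
      (fun (b : Option Int × Option Int) j =>
        match hs.get? (get_substring_hash (pvPH pvBASE1 pvMOD1 cs).1 (pvPH pvBASE1 pvMOD1 cs).2
                        j (j + (L : Int)) pvMOD1,
                      get_substring_hash (pvPH pvBASE2 pvMOD2 cs).1 (pvPH pvBASE2 pvMOD2 cs).2
                        j (j + (L : Int)) pvMOD2) with
        | some i =>
          match b with
          | (none, _) => (some i, some j)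
          | (some bi, bj) =>
            if i < bi then (some i, some j)
            else if i = bi then
              match bj with
              | some bjv => if j < bjv then (some i, some j) else (some bi, some bjv)
              | none => (some bi, none)
            else (some bi, bj)
        | none => b) (none, none)
      = (pvPs L cs).foldl
          (fun (b : Option Int × Option Int) p =>
            match hs.get? p.2 with
            | some i =>
              match b with
              | (none, _) => (some i, some p.1)
              | (some bi, bj) =>
                if i < bi then (some i, some p.1)
                else if i = bi then
                  match bj with
                  | some bjv => if p.1 < bjv then (some i, some p.1) else (some bi, some bjv)
                  | none => (some bi, none)
                else (some bi, bj)
            | none => b) (none, none) := by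
  rw [PySem.List.pyRange_one, sub_zero,
    show (((cs.length : Int)) - (L : Int) + 1).toNat = cs.length + 1 - L from by omega]
  rw [List.foldl_map]
  unfold pvPs
  rw [List.foldl_map]
  apply PySem.List.foldl_congr_mem
  intro b k hk
  have hkL : k + L ≤ cs.length := by have := List.mem_range.mp hk; omega
  simp only [zero_add]
  rw [pvGsh_eq pvBASE1 pvM1 cs L k hkL, pvGsh_eq pvBASE2 pvM2 cs L k hkL]
  rfl

lemma pvFinal (LL : Int) (r : Option (Int × Int)) :
    (match pvConv r with
     | (some i, some j) => some (i, j, LL)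
     | _ => (none : Option (Int × Int × Int)))
    = match r with
      | some bv => some (bv.1, bv.2, LL)
      | none => none := by
  cases r with
  | none => rfl
  | some bv => rfl

lemma pvA_eq_ref (s t : String) (L : Nat) (hL : 1 ≤ L) :
    has_common_substring s t (L : Int) = pvRef s t L := by
  simp only [has_common_substring, pvLne L hL, Bool.false_eq_true, if_false]
  rw [pvDictA s.toList L hL]
  rw [pvDict_eq (pvPs L s.toList) PySem.Dict.empty
      (by
        unfold pvPs
        refine List.Pairwise.map _ (fun a b h => ?_) List.pairwise_lt_range
        show ((a : Nat) : Int) < ((b : Nat) : Int)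
        exact_mod_cast h)
      (by intro k v hv; simp [pysem] at hv)]
  rw [pvPrecompute_eq pvBASE1 pvMOD1_pos t.toList, pvPrecompute_eq pvBASE2 pvMOD2_pos t.toList]
  rw [pvScanA t.toList L]
  rw [show ((none, none) : Option Int × Option Int) = pvConv none from rfl]
  rw [pvScan_eq]
  unfold pvRef
  exact pvFinal ((L : Nat) : Int) _

-- ===== A's reference form is the minimum over the candidate list pvCA =====

lemma pvRef_eq_CA (s t : String) (L : Nat) :
    pvRef s t L
      = match (pvCA (s.toList.length + 1 - L) (t.toList.length + 1 - L)
                 (pvKey L s.toList) (pvKey L t.toList)).foldl pvUpd none with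
        | some bv => some (bv.1, bv.2, (L : Int))
        | none => none := by
  unfold pvRef
  have hget : ∀ k, ((pvPs L s.toList).foldl
      (fun (d : PySem.Dict (Int × Int) Int) p =>
        if d.contains p.2 then d else d.insert p.2 p.1) PySem.Dict.empty).get? k
      = ((List.range (s.toList.length + 1 - L)).find?
          (fun i => pvKey L s.toList i == k)).map (fun (i : Nat) => (i : Int)) := by
    intro k
    rw [pvFW_get?]
    rw [PySem.Dict.get?_empty, Option.none_or]
    unfold pvPs
    rw [List.find?_map, Option.map_map]
    rfl
  simp only []
  rw [show (pvPs L t.toList) = (List.range (t.toList.length + 1 - L)).map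
        (fun (k : Nat) => ((k : Int), pvKey L t.toList k)) from rfl]
  rw [List.foldl_map]
  have hbody : ∀ (b : Option (Int × Int)) (j : Nat),
      (match ((pvPs L s.toList).foldl
          (fun (d : PySem.Dict (Int × Int) Int) p =>
            if d.contains p.2 then d else d.insert p.2 p.1) PySem.Dict.empty).get?
            (pvKey L t.toList j) with
       | some i => pvUpd b (i, (j : Int))
       | none => b)
      = match ((List.range (s.toList.length + 1 - L)).find?
            (fun i => pvKey L s.toList i == pvKey L t.toList j)).map
              (fun i => (((i : Nat) : Int), (j : Int))) with
        | some c => pvUpd b c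
        | none => b := by
    intro b j
    rw [hget (pvKey L t.toList j)]
    cases (List.range (s.toList.length + 1 - L)).find?
        (fun i => pvKey L s.toList i == pvKey L t.toList j) with
    | none => rfl
    | some i0 => rfl
  rw [PySem.List.foldl_congr_mem _ _ _ _ (fun b j _ => hbody b j)]
  rw [pvFoldOpt]
  unfold pvCA
  rfl

-- ===== B is the minimum over the candidate list pvCB =====

lemma pvWindow_key_eq (cs : List Char) (L : Nat) (k : Nat) :
    window_key cs (k : Int) (L : Int) = pvKey L cs k := by
  unfold window_key
  rw [PySem.List.slice_natCast_add]
  rw [show ((cs.drop k).take L).foldl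
        (fun (h : Int × Int) c =>
          (PySem.Int.mod (h.1 * pvBASE1 + pvOrd c) pvMOD1,
           PySem.Int.mod (h.2 * pvBASE2 + pvOrd c) pvMOD2)) (0, 0)
      = (((cs.drop k).take L).foldl (fun h c => PySem.Int.mod (h * pvBASE1 + pvOrd c) pvMOD1) 0,
         ((cs.drop k).take L).foldl (fun h c => PySem.Int.mod (h * pvBASE2 + pvOrd c) pvMOD2) 0)
    from PySem.List.foldl_prod_mk
      (fun h c => PySem.Int.mod (h * pvBASE1 + pvOrd c) pvMOD1)
      (fun h c => PySem.Int.mod (h * pvBASE2 + pvOrd c) pvMOD2) _ 0 0]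
  unfold pvKey pvWH
  have e1 : (0 : Int) = PySem.Int.mod 0 pvMOD1 := by
    rw [PySem.Int.mod_eq_emod_of_pos pvM1]; simp
  have e2 : (0 : Int) = PySem.Int.mod 0 pvMOD2 := by
    rw [PySem.Int.mod_eq_emod_of_pos pvM2]; simp
  refine Prod.ext ?_ ?_
  · show ((cs.drop k).take L).foldl
        (fun h c => PySem.Int.mod (h * pvBASE1 + pvOrd c) pvMOD1) 0 = _
    rw [e1, pvFold_mod pvBASE1 pvM1]
    rfl
  · show ((cs.drop k).take L).foldl
        (fun h c => PySem.Int.mod (h * pvBASE2 + pvOrd c) pvMOD2) 0 = _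
    rw [e2, pvFold_mod pvBASE2 pvM2]
    rfl

lemma pvKeysB (cs : List Char) (L : Nat) :
    (PySem.List.pyRange 0 ((cs.length : Int) - (L : Int) + 1) 1).map
        (fun i => window_key cs i (L : Int))
      = (List.range (cs.length + 1 - L)).map (pvKey L cs) := by
  rw [PySem.List.pyRange_one, sub_zero,
    show (((cs.length : Int)) - (L : Int) + 1).toNat = cs.length + 1 - L from by omega]
  rw [List.map_map]
  refine List.map_congr_left ?_
  intro k _
  show window_key cs ((0 : Int) + (k : Int)) (L : Int) = pvKey L cs k
  rw [zero_add, pvWindow_key_eq]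

lemma pvB_eq_CB (s t : String) (L : Nat) (hL : 1 ≤ L) :
    has_common_substring_alt s t (L : Int)
      = match (pvCB (s.toList.length + 1 - L) (t.toList.length + 1 - L)
                 (pvKey L s.toList) (pvKey L t.toList)).foldl pvUpd none with
        | some bv => some (bv.1, bv.2, (L : Int))
        | none => none := by
  simp only [has_common_substring_alt, pvLne L hL, Bool.false_eq_true, if_false]
  rw [pvKeysB s.toList L, pvKeysB t.toList L, pvEnum_keys, pvEnum_keys]
  rw [show (pvPs L s.toList) = (List.range (s.toList.length + 1 - L)).map
        (fun (k : Nat) => ((k : Int), pvKey L s.toList k)) from rfl]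
  rw [List.foldl_map]
  have hinner : ∀ (b : Option (Int × Int)) (i : Nat),
      (pvPs L t.toList).foldl
        (fun (b : Option (Int × Int)) q =>
          if (((i : Int), pvKey L s.toList i) : Int × (Int × Int)).2 = q.2 then
            match b with
            | none => some ((((i : Int), pvKey L s.toList i) : Int × (Int × Int)).1, q.1)
            | some bv =>
              if (((i : Int), pvKey L s.toList i) : Int × (Int × Int)).1 < bv.1
                  ∨ ((((i : Int), pvKey L s.toList i) : Int × (Int × Int)).1 = bv.1 ∧ q.1 < bv.2)
              then some ((((i : Int), pvKey L s.toList i) : Int × (Int × Int)).1, q.1) else b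
          else b)
        b
      = ((List.range (t.toList.length + 1 - L)).filterMap
          (fun j => if pvKey L s.toList i = pvKey L t.toList j
                    then some (((i : Nat) : Int), ((j : Nat) : Int)) else none)).foldl pvUpd b := by
    intro b i
    rw [show (pvPs L t.toList) = (List.range (t.toList.length + 1 - L)).map
          (fun (k : Nat) => ((k : Int), pvKey L t.toList k)) from rfl]
    rw [List.foldl_map]
    rw [← pvFoldOpt (fun j => if pvKey L s.toList i = pvKey L t.toList j
          then some (((i : Nat) : Int), ((j : Nat) : Int)) else none)]
    apply PySem.List.foldl_congr_mem
    intro b' j _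
    show (if pvKey L s.toList i = pvKey L t.toList j then
            match b' with
            | none => some ((i : Int), (j : Int))
            | some bv => if (i : Int) < bv.1 ∨ ((i : Int) = bv.1 ∧ (j : Int) < bv.2)
                         then some ((i : Int), (j : Int)) else b'
          else b')
        = match (if pvKey L s.toList i = pvKey L t.toList j
                 then some ((i : Int), (j : Int)) else none) with
          | some c => pvUpd b' c
          | none => b'
    by_cases hk : pvKey L s.toList i = pvKey L t.toList j
    · rw [if_pos hk, if_pos hk]
      cases b' with
      | none => rfl
      | some bv => simp [pvUpd]
    · rw [if_neg hk, if_neg hk]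
  rw [PySem.List.foldl_congr_mem _ _ _ _ (fun b i _ => hinner b i)]
  rw [pvFmFlat]
  unfold pvCB
  rfl

-- ===== VERDICT (by name: the statement is the Claim_ definition above) =====
theorem has_common_substring_spec : Claim_equal_has_common_substring := by
  intro s t len _ hpre
  unfold Spec_has_common_substring
  by_cases h0 : len = 0
  · subst h0
    rfl
  · have hL : len = ((len.toNat : Nat) : Int) := by
      unfold Pre_has_common_substring at hpre; omega
    have h1 : 1 ≤ len.toNat := by
      unfold Pre_has_common_substring at hpre; omega
    rw [hL, pvA_eq_ref s t len.toNat h1, pvRef_eq_CA s t len.toNat,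
      pvB_eq_CB s t len.toNat h1,
      pvFm_CA_CB (s.toList.length + 1 - len.toNat) (t.toList.length + 1 - len.toNat)
        (pvKey len.toNat s.toList) (pvKey len.toNat t.toList)]
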